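-- pv_equiv track=rewrite | github.com/daniellezhang/comp10001project | project3.py | phasedout_group_1
-- ===== SOURCE A (Python) =====
-- from collections import defaultdict as dd
--
-- WILD_CARDS = ['AS', 'AH', 'AD', 'AC']
--
-- def phasedout_group_1(group):
--     '''Return 1 if the group satisfies type 1's requirement,
--     otherwise return None'''
--     value_count = dd(int)
--     # Check the number of cards
--     if len(group) != 3:
--         return None
--
--     # Counting values of the card set
--     for card in group:
--         if card in WILD_CARDS:
--             value_count['wild_card'] += 1
--         else:
--             value_count[card[0]] += 1
--
--     for value in value_count.copy().keys():
--         # 3 natural cards with same value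
--         if value != 'wild_card' and value_count[value] == 3:
--             return 1
--
--         # 2 natural cards with same value + one wild card
--         elif value_count['wild_card'] == 1 and value_count[value] == 2:
--             return 1
--
--     return None
-- ===== SOURCE B (Python) =====
-- WILD_CARDS = ['AS', 'AH', 'AD', 'AC']
--
-- def phasedout_group_1(group):
--     '''Return 1 if the group satisfies type 1's requirement,
--     otherwise return None'''
--     if len(group) != 3:
--         return None
--     naturals = [card[0] for card in group if card not in WILD_CARDS]
--     if len(naturals) >= 2 and len(set(naturals)) == 1:
--         return 1
--     return None
-- ===== Notes on version B (the rewrite author's own statement) =====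
-- stated objective: simpler
-- what changed: Replaces the defaultdict counting loop and the second loop over value counts with a single list of non-wild first characters and one uniqueness test (at least two naturals, all equal), exploiting the size-3 constraint.
import Mathlib
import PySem

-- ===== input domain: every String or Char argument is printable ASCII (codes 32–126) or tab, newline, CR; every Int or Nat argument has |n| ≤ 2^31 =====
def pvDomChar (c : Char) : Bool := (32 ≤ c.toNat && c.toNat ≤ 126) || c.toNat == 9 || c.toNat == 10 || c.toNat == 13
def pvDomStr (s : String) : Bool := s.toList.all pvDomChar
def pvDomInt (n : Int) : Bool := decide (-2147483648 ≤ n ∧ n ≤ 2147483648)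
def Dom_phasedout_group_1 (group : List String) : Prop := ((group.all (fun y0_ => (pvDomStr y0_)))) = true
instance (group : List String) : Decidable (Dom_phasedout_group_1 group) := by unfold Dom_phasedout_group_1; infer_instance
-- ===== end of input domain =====

-- B is simpler: one list of non-wild first characters plus a uniqueness test replaces
-- A's defaultdict counting loop and its second loop over the value counts.

-- ===== PORT A =====
-- WILD_CARDS module constant
def pvWildCards : List String := ["AS", "AH", "AD", "AC"]

-- first character of a card as a 1-char string; 'card[0]' raises on "" — those inputs
-- are excluded by Pre_, the '?' default is never reached there
def pvFirstChar (card : String) : String := ((PySem.Str.pyGet? card 0).getD '?').toString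

def phasedout_group_1 (group : List String) : Option Int :=
  if group.length ≠ 3 then none
  else
    let vc : PySem.Dict String Int := group.foldl (fun d card =>
      if pvWildCards.contains card then d.modify "wild_card" 0 (· + 1)
      else d.modify (pvFirstChar card) 0 (· + 1)) PySem.Dict.empty
    if vc.keys.any (fun v =>
         (v != "wild_card" && vc.getD v 0 == 3) ||
         (vc.getD "wild_card" 0 == 1 && vc.getD v 0 == 2)) then some 1 else none

-- ===== PORT B =====
def phasedout_group_1_alt (group : List String) : Option Int :=
  if group.length ≠ 3 then none
  else
    let naturals := (group.filter (fun c => ¬ pvWildCards.contains c)).map pvFirstChar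
    if 2 ≤ naturals.length ∧ (PySem.Set.ofList naturals).length = 1 then some 1 else none

-- ===== PRECONDITION & SPEC =====
-- Pre_ excludes exactly the inputs on which A raises IndexError: in a size-3 group only
-- non-wild cards reach 'card[0]', which raises on the empty string; B raises there too.
def Pre_phasedout_group_1 (group : List String) : Prop :=
  group.length = 3 → ∀ card ∈ group, card ∉ pvWildCards → card ≠ ""
instance (group : List String) : Decidable (Pre_phasedout_group_1 group) := by unfold Pre_phasedout_group_1; infer_instance

def pvWitness_phasedout_group_1 : List String := ["3H", "3D", "AS"]

def Spec_phasedout_group_1 (group : List String) (out : Option Int) : Prop := out = phasedout_group_1_alt group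
instance (group : List String) (out : Option Int) : Decidable (Spec_phasedout_group_1 group out) := by unfold Spec_phasedout_group_1; infer_instance

-- ===== CLAIM (what is proved, stated in full; the proofs are below) =====
def Claim_equal_phasedout_group_1 : Prop := ∀ (group : List String), Dom_phasedout_group_1 group → Pre_phasedout_group_1 group → Spec_phasedout_group_1 group (phasedout_group_1 group)

-- ===== LEMMAS AND PROOFS =====

-- the rank key A counts each card under: 'wild_card' for wilds, the first character otherwise
def pvKey (card : String) : String :=
  if pvWildCards.contains card then "wild_card" else pvFirstChar card

theorem pvFirstChar_ne_wild (card : String) : pvFirstChar card ≠ "wild_card" := by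
  intro h
  have := congrArg String.toList h
  simp [pvFirstChar, Char.toString] at this

-- A's counting loop is Counter(map(pvKey, group))
theorem pv_fold_eq_counter (l : List String) :
    l.foldl (fun d card =>
      if pvWildCards.contains card then d.modify "wild_card" 0 (· + 1)
      else d.modify (pvFirstChar card) 0 (· + 1)) PySem.Dict.empty
    = PySem.Dict.counter (l.map pvKey) := by
  rw [PySem.Dict.counter_eq_foldl, List.foldl_map]
  congr 1
  funext d card
  simp only [pvKey, apply_ite (fun k => d.modify k 0 (· + 1))]

-- B's naturals list is the key list with 'wild_card' filtered out
theorem pv_naturals_eq (l : List String) :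
    (l.filter (fun c => ¬ pvWildCards.contains c)).map pvFirstChar
    = (l.map pvKey).filter (fun v => v != "wild_card") := by
  induction l with
  | nil => rfl
  | cons c t ih =>
    by_cases hw : c ∈ pvWildCards <;>
      simpa [pvKey, hw, pvFirstChar_ne_wild c, List.contains_eq_mem] using ih

-- the length-3 core: A's per-key test succeeds iff at least two naturals all share one rank
theorem pv_core' (x y z : String) :
  ((PySem.Set.ofList [x,y,z]).any (fun v =>
     (v != "wild_card" && ([x,y,z].count v : Int) == 3) ||
     (([x,y,z].count "wild_card" : Int) == 1 && ([x,y,z].count v : Int) == 2)) = true)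
  ↔ (2 ≤ (List.filter (fun v => v != "wild_card") [x,y,z]).length ∧
     (PySem.Set.ofList (List.filter (fun v => v != "wild_card") [x,y,z])).length = 1) := by
  by_cases hx : x = "wild_card" <;> by_cases hy : y = "wild_card" <;> by_cases hz : z = "wild_card" <;>
    by_cases hxy : x = y <;> by_cases hxz : x = z <;> by_cases hyz : y = z <;>
    simp_all [PySem.Set.ofList, PySem.Set.add, List.count_cons, List.contains_eq_mem] <;>
    split_ifs <;> simp_all <;> (try omega) <;> (try tauto)

theorem pv_main (group : List String) : phasedout_group_1 group = phasedout_group_1_alt group := by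
  by_cases hl : group.length = 3
  · obtain ⟨a, b, c, rfl⟩ := List.length_eq_three.mp hl
    simp only [phasedout_group_1, phasedout_group_1_alt, pv_fold_eq_counter, pv_naturals_eq,
      PySem.Dict.keys_counter, PySem.Dict.getD_counter, List.map_cons, List.map_nil,
      List.length_cons, List.length_nil]
    rw [if_neg (show ¬((0:Nat)+1+1+1 ≠ 3) by omega), if_neg (show ¬((0:Nat)+1+1+1 ≠ 3) by omega)]
    exact if_congr (pv_core' (pvKey a) (pvKey b) (pvKey c)) rfl rfl
  · simp [phasedout_group_1, phasedout_group_1_alt, hl]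

-- ===== VERDICT (by name: the statement is the Claim_ definition above) =====
theorem phasedout_group_1_spec : Claim_equal_phasedout_group_1 := by
  intro group _ _
  exact pv_main group
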